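-- pv_equiv track=rewrite | github.com/LangSight/langsight | src/langsight/tagging/engine.py | tag_from_spans
-- ===== SOURCE A (Python) =====
-- from enum import StrEnum
-- from typing import Any
--
-- class HealthTag(StrEnum):
--     """Machine-readable session health tags, ordered by priority (highest first)."""
--
--     LOOP_DETECTED = "loop_detected"
--     BUDGET_EXCEEDED = "budget_exceeded"
--     CIRCUIT_BREAKER_OPEN = "circuit_breaker_open"
--     SCHEMA_DRIFT = "schema_drift"
--     TIMEOUT = "timeout"
--     TOOL_FAILURE = "tool_failure"
--     SUCCESS_WITH_FALLBACK = "success_with_fallback"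
--     SUCCESS = "success"
--
-- def tag_from_spans(spans: list[dict[str, Any]]) -> HealthTag:
--     """Compute the health tag for a session from its flat list of spans.
--
--     Priority order (highest wins):
--     1. Any prevented span with "loop_detected" → LOOP_DETECTED
--     2. Any prevented span with "budget_exceeded" → BUDGET_EXCEEDED
--     3. Any prevented span with "circuit_breaker" → CIRCUIT_BREAKER_OPEN
--     4. Any span with "schema drift" in error → SCHEMA_DRIFT
--     5. Any span with status=timeout → TIMEOUT
--     6. Any span with status=error → TOOL_FAILURE
--     7. Retries detected (same tool called multiple times, some failed) → SUCCESS_WITH_FALLBACK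
--     8. All spans succeeded → SUCCESS
--     """
--     has_error = False
--     has_timeout = False
--     has_schema_drift = False
--
--     # Track tool calls for fallback detection
--     tool_results: dict[str, list[str]] = {}  # (tool_name) → [statuses]
--
--     for span in spans:
--         status = str(span.get("status", "")).lower()
--         error = str(span.get("error", "") or "").lower()
--
--         # Priority 1-3: Prevention events
--         if status == "prevented":
--             if "loop_detected" in error:
--                 return HealthTag.LOOP_DETECTED
--             if "budget_exceeded" in error:
--                 return HealthTag.BUDGET_EXCEEDED
--             if "circuit_breaker" in error:
--                 return HealthTag.CIRCUIT_BREAKER_OPEN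
--
--         # Priority 4: Schema drift
--         if "schema drift" in error:
--             has_schema_drift = True
--
--         # Priority 5: Timeout
--         if status == "timeout":
--             has_timeout = True
--
--         # Priority 6: Error
--         if status == "error":
--             has_error = True
--
--         # Track for fallback detection — only MCP tool_call spans.
--         # LLM generation spans (span_type="agent") are excluded: retrying the LLM
--         # is not an MCP fallback. Mixing them caused false success_with_fallback tags
--         # when a session ended on a Gemini/OpenAI error.
--         if span.get("span_type") == "tool_call":
--             tool_name = span.get("tool_name", "")
--             if tool_name:
--                 tool_results.setdefault(tool_name, []).append(status)
--
--     if has_schema_drift: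
--         return HealthTag.SCHEMA_DRIFT
--
--     # Priority 7: Fallback detection — the session ultimately succeeded despite
--     # some MCP tool call failures (retried and recovered on the SAME tool).
--     # Requires at least one tool with both a failure and a success, AND no tool
--     # with only failures that were never resolved (unresolved errors → TOOL_FAILURE).
--     any_fallback = False
--     any_unresolved_error = False
--     for statuses in tool_results.values():
--         tool_has_failure = any(s in ("error", "timeout") for s in statuses)
--         tool_has_success = any(s == "success" for s in statuses)
--         if tool_has_failure:
--             if tool_has_success:
--                 any_fallback = True
--             else:
--                 any_unresolved_error = True
--
--     if any_fallback and not any_unresolved_error: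
--         return HealthTag.SUCCESS_WITH_FALLBACK
--
--     if has_timeout:
--         return HealthTag.TIMEOUT
--     if has_error:
--         return HealthTag.TOOL_FAILURE
--
--     return HealthTag.SUCCESS
-- ===== SOURCE B (Python) =====
-- def tag_from_spans(spans):
--     # Pass 1: first prevented span with a recognized reason wins (ordered scan).
--     for span in spans:
--         if str(span.get("status", "")).lower() == "prevented":
--             err = str(span.get("error", "") or "").lower()
--             for needle, tag in (("loop_detected", "loop_detected"),
--                                 ("budget_exceeded", "budget_exceeded"),
--                                 ("circuit_breaker", "circuit_breaker_open")):
--                 if needle in err: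
--                     return tag
--     # Pass 2: schema drift anywhere.
--     if any("schema drift" in str(s.get("error", "") or "").lower() for s in spans):
--         return "schema_drift"
--     # Pass 3: fallback analysis over named MCP tool calls.
--     calls = [(s.get("tool_name", ""), str(s.get("status", "")).lower())
--              for s in spans
--              if s.get("span_type") == "tool_call" and s.get("tool_name", "")]
--     tools = list(dict.fromkeys(name for name, _ in calls))
--     def failed(t):
--         return any(st in ("error", "timeout") for n, st in calls if n == t)
--     def ok(t):
--         return any(st == "success" for n, st in calls if n == t)
--     if any(failed(t) and ok(t) for t in tools) and not any(failed(t) and not ok(t) for t in tools):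
--         return "success_with_fallback"
--     # Pass 4/5: timeout then error anywhere.
--     if any(str(s.get("status", "")).lower() == "timeout" for s in spans):
--         return "timeout"
--     if any(str(s.get("status", "")).lower() == "error" for s in spans):
--         return "tool_failure"
--     return "success"
-- ===== Notes on version B (the rewrite author's own statement) =====
-- stated objective: alternative
-- what changed: A's single accumulating pass with a tool->statuses dict is replaced by one ordered prevention scan (first prevented span with a recognized reason wins) followed by independent any()-passes per condition and a dict-free per-tool fallback analysis over a flat (tool, status) call list.
import Mathlib
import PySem

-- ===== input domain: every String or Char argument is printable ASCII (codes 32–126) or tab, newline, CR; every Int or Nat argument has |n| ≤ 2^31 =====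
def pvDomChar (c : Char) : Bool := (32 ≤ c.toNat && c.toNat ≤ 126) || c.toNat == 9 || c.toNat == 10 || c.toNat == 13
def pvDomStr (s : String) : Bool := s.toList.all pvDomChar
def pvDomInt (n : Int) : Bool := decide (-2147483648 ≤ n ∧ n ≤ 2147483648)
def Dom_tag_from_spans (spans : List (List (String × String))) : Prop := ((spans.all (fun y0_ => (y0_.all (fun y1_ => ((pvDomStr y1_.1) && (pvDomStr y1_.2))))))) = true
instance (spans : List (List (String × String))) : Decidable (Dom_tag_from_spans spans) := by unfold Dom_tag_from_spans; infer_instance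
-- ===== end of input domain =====

-- B re-implements A's single accumulating pass as one ordered prevention scan followed by
-- independent per-condition passes (dict-free fallback analysis); objective: alternative decomposition.

-- shared field accessors (span.get(...) shape, used by both ports)
def pvStatusOf (sp : List (String × String)) : String :=
  PySem.Str.lower ((PySem.Dict.mk sp).getD "status" "")
def pvErrorOf (sp : List (String × String)) : String :=
  PySem.Str.lower ((PySem.Dict.mk sp).getD "error" "")

-- ===== PORT A =====
-- the code after the final `for` loop of A (reached with the accumulated state)
def tagAFinish (he ht hs : Bool) (tr : PySem.Dict String (List String)) : String :=
  if hs then "schema_drift"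
  else
    let p := tr.values.foldl (fun (ac : Bool × Bool) sts =>
        let f := sts.any (fun s => s == "error" || s == "timeout")
        let su := sts.any (fun s => s == "success")
        if f then (if su then (true, ac.2) else (ac.1, true)) else ac) (false, false)
    if p.1 && !p.2 then "success_with_fallback"
    else if ht then "timeout"
    else if he then "tool_failure"
    else "success"

-- A's main loop (early returns become result values; the post-prevention state
-- update is factored into `cont`, computed from the same span fields)
def tagALoop : List (List (String × String)) → Bool → Bool → Bool → PySem.Dict String (List String) → String
  | [], he, ht, hs, tr => tagAFinish he ht hs tr
  | sp :: rest, he, ht, hs, tr =>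
    let status := pvStatusOf sp
    let error := pvErrorOf sp
    let hs' := hs || PySem.Str.isIn "schema drift" error
    let ht' := ht || (status == "timeout")
    let he' := he || (status == "error")
    let tr' :=
      if (PySem.Dict.mk sp).get? "span_type" == some "tool_call" then
        let tn := (PySem.Dict.mk sp).getD "tool_name" ""
        if tn != "" then tr.modify tn [] (· ++ [status]) else tr
      else tr
    let cont := tagALoop rest he' ht' hs' tr'
    if status == "prevented" then
      if PySem.Str.isIn "loop_detected" error then "loop_detected"
      else if PySem.Str.isIn "budget_exceeded" error then "budget_exceeded"
      else if PySem.Str.isIn "circuit_breaker" error then "circuit_breaker_open"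
      else cont
    else cont

def tag_from_spans (spans : List (List (String × String))) : String :=
  tagALoop spans false false false PySem.Dict.empty

-- ===== PORT B =====
-- pass 1: first prevented span with a recognized reason
def firstPrevTag : List (List (String × String)) → Option String
  | [] => none
  | sp :: rest =>
    if pvStatusOf sp == "prevented" then
      let err := pvErrorOf sp
      if PySem.Str.isIn "loop_detected" err then some "loop_detected"
      else if PySem.Str.isIn "budget_exceeded" err then some "budget_exceeded"
      else if PySem.Str.isIn "circuit_breaker" err then some "circuit_breaker_open"
      else firstPrevTag rest
    else firstPrevTag rest

-- the `calls` comprehension of B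
def toolCalls (spans : List (List (String × String))) : List (String × String) :=
  (spans.filter (fun sp =>
      ((PySem.Dict.mk sp).get? "span_type" == some "tool_call")
        && ((PySem.Dict.mk sp).getD "tool_name" "" != ""))).map
    (fun sp => ((PySem.Dict.mk sp).getD "tool_name" "", pvStatusOf sp))

def tag_from_spans_alt (spans : List (List (String × String))) : String :=
  match firstPrevTag spans with
  | some t => t
  | none =>
    if spans.any (fun sp => PySem.Str.isIn "schema drift" (pvErrorOf sp)) then "schema_drift"
    else
      let calls := toolCalls spans
      let tools := PySem.List.dedup (calls.map (·.1))
      let failed := fun t => (calls.filter (fun c => c.1 == t)).any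
        (fun c => c.2 == "error" || c.2 == "timeout")
      let ok := fun t => (calls.filter (fun c => c.1 == t)).any (fun c => c.2 == "success")
      if (tools.any fun t => failed t && ok t) && !(tools.any fun t => failed t && !ok t) then
        "success_with_fallback"
      else if spans.any (fun sp => pvStatusOf sp == "timeout") then "timeout"
      else if spans.any (fun sp => pvStatusOf sp == "error") then "tool_failure"
      else "success"

-- ===== PRECONDITION & SPEC =====
def Spec_tag_from_spans (spans : List (List (String × String))) (out : String) : Prop := out = tag_from_spans_alt spans
instance (spans : List (List (String × String))) (out : String) : Decidable (Spec_tag_from_spans spans out) := by unfold Spec_tag_from_spans; infer_instance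

-- ===== CLAIM (what is proved, stated in full; the proofs are below) =====
def Claim_equal_tag_from_spans : Prop := ∀ (spans : List (List (String × String))), Dom_tag_from_spans spans → Spec_tag_from_spans spans (tag_from_spans spans)

-- ===== LEMMAS AND PROOFS =====

-- A's two-flag fold over the statuses lists is two `any`s
lemma flags_fold (vals : List (List String)) (ac : Bool × Bool) :
    vals.foldl (fun (ac : Bool × Bool) sts =>
        let f := sts.any (fun s => s == "error" || s == "timeout")
        let su := sts.any (fun s => s == "success")
        if f then (if su then (true, ac.2) else (ac.1, true)) else ac) ac
    = (ac.1 || vals.any (fun sts => sts.any (fun s => s == "error" || s == "timeout")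
          && sts.any (fun s => s == "success")),
       ac.2 || vals.any (fun sts => sts.any (fun s => s == "error" || s == "timeout")
          && !sts.any (fun s => s == "success"))) := by
  induction vals generalizing ac with
  | nil => simp
  | cons v t ih =>
    simp only [List.foldl_cons, List.any_cons]
    rw [ih]
    cases hf : v.any (fun s => s == "error" || s == "timeout") <;>
      cases hsu : v.any (fun s => s == "success") <;>
        simp_all [Bool.or_comm]

-- the step A's loop applies to the tool_results dict on one span
def pvDictStep (tr : PySem.Dict String (List String)) (p : String × String) :
    PySem.Dict String (List String) :=
  tr.modify p.1 [] (· ++ [p.2])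

lemma toolCalls_cons (sp : List (String × String)) (rest : List (List (String × String))) :
    toolCalls (sp :: rest) =
      (if ((PySem.Dict.mk sp).get? "span_type" == some "tool_call")
          && ((PySem.Dict.mk sp).getD "tool_name" "" != "") then
        ((PySem.Dict.mk sp).getD "tool_name" "", pvStatusOf sp) :: toolCalls rest
      else toolCalls rest) := by
  simp only [toolCalls, List.filter_cons]
  split <;> simp_all

-- A's loop = B's first pass, then A's finish on the fully-accumulated state
-- A's per-span dict update as a conditional single step
lemma trStep_eq (sp : List (String × String)) (tr : PySem.Dict String (List String)) :
    (if (PySem.Dict.mk sp).get? "span_type" == some "tool_call" then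
       let tn := (PySem.Dict.mk sp).getD "tool_name" ""
       if tn != "" then tr.modify tn [] (· ++ [pvStatusOf sp]) else tr
     else tr)
    = (if ((PySem.Dict.mk sp).get? "span_type" == some "tool_call")
          && ((PySem.Dict.mk sp).getD "tool_name" "" != "") then
        pvDictStep tr ((PySem.Dict.mk sp).getD "tool_name" "", pvStatusOf sp)
      else tr) := by
  by_cases h1 : ((PySem.Dict.mk sp).get? "span_type" == some "tool_call") = true <;>
    by_cases h2 : ((PySem.Dict.mk sp).getD "tool_name" "" != "") = true <;>
      simp [h1, h2, pvDictStep]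

-- A's loop = B's first pass, then A's finish on the fully-accumulated state
lemma tagALoop_eq (spans : List (List (String × String))) :
    ∀ (he ht hs : Bool) (tr : PySem.Dict String (List String)),
      tagALoop spans he ht hs tr =
        match firstPrevTag spans with
        | some t => t
        | none => tagAFinish
            (he || spans.any (fun sp => pvStatusOf sp == "error"))
            (ht || spans.any (fun sp => pvStatusOf sp == "timeout"))
            (hs || spans.any (fun sp => PySem.Str.isIn "schema drift" (pvErrorOf sp)))
            ((toolCalls spans).foldl pvDictStep tr) := by
  induction spans with
  | nil => intro he ht hs tr; simp [tagALoop, firstPrevTag, toolCalls]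
  | cons sp rest ih =>
    intro he ht hs tr
    rw [tagALoop, firstPrevTag, toolCalls_cons]
    by_cases hp : (pvStatusOf sp == "prevented") = true
    · rw [if_pos hp, if_pos hp]
      by_cases h1 : (PySem.Str.isIn "loop_detected" (pvErrorOf sp)) = true
      · rw [if_pos h1, if_pos h1]
      · rw [if_neg h1, if_neg h1]
        by_cases h2 : (PySem.Str.isIn "budget_exceeded" (pvErrorOf sp)) = true
        · rw [if_pos h2, if_pos h2]
        · rw [if_neg h2, if_neg h2]
          by_cases h3 : (PySem.Str.isIn "circuit_breaker" (pvErrorOf sp)) = true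
          · rw [if_pos h3, if_pos h3]
          · rw [if_neg h3, if_neg h3, ih, trStep_eq]
            cases hfp : firstPrevTag rest with
            | some t => rfl
            | none =>
              simp only [List.any_cons]
              by_cases hc : (((PySem.Dict.mk sp).get? "span_type" == some "tool_call")
                  && ((PySem.Dict.mk sp).getD "tool_name" "" != "")) = true
              · rw [if_pos hc, if_pos hc]
                simp [Bool.or_assoc]
              · rw [if_neg hc, if_neg hc]
                simp [Bool.or_assoc]
    · rw [if_neg hp, if_neg hp, ih, trStep_eq]
      cases hfp : firstPrevTag rest with
      | some t => rfl
      | none =>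
        simp only [List.any_cons]
        by_cases hc : (((PySem.Dict.mk sp).get? "span_type" == some "tool_call")
            && ((PySem.Dict.mk sp).getD "tool_name" "" != "")) = true
        · rw [if_pos hc, if_pos hc]
          simp [Bool.or_assoc]
        · rw [if_neg hc, if_neg hc]
          simp [Bool.or_assoc]

-- any over the accumulated dict's values = any over the distinct tool names
lemma dict_any (calls : List (String × String)) (P : List String → Bool) :
    ((calls.foldl pvDictStep PySem.Dict.empty).values.any P)
    = (PySem.List.dedup (calls.map (·.1))).any
        (fun t => P ((calls.filter (fun c => c.1 == t)).map (·.2))) := by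
  have hfold : calls.foldl pvDictStep PySem.Dict.empty
      = calls.foldl (fun d x => d.modify x.1 [] (· ++ [x.2])) PySem.Dict.empty := rfl
  rw [hfold]
  have hnd : (calls.foldl (fun d x => d.modify x.1 [] (· ++ [x.2]))
      PySem.Dict.empty).keys.Nodup :=
    PySem.Dict.nodup_keys_foldl_modify_key calls Prod.fst [] (fun d x => (· ++ [x.2]))
      PySem.Dict.empty (by simp)
  rw [PySem.Dict.values_eq_map_keys _ hnd [], PySem.Dict.keys_foldl_modify_key,
    List.any_map, PySem.List.dedup_eq_ofList]
  have hupd : PySem.Set.update (PySem.Dict.empty : PySem.Dict String (List String)).keys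
      (calls.map Prod.fst) = PySem.Set.ofList (calls.map (·.1)) := by
    simp [PySem.Set.ofList_eq_foldl, PySem.Set.update]
  rw [hupd]
  apply PySem.List.any_congr_mem
  intro t ht
  simp only [Function.comp]
  congr 1
  rw [PySem.Dict.getD_foldl_modify_append]
  simp

-- the accumulated dict, evaluated by A's finish flags, equals B's dict-free analysis
lemma finish_eq (spans : List (List (String × String))) :
    tagAFinish
        (spans.any (fun sp => pvStatusOf sp == "error"))
        (spans.any (fun sp => pvStatusOf sp == "timeout"))
        (spans.any (fun sp => PySem.Str.isIn "schema drift" (pvErrorOf sp)))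
        ((toolCalls spans).foldl pvDictStep PySem.Dict.empty)
    = (if spans.any (fun sp => PySem.Str.isIn "schema drift" (pvErrorOf sp)) then "schema_drift"
      else
        let calls := toolCalls spans
        let tools := PySem.List.dedup (calls.map (·.1))
        let failed := fun t => (calls.filter (fun c => c.1 == t)).any
          (fun c => c.2 == "error" || c.2 == "timeout")
        let ok := fun t => (calls.filter (fun c => c.1 == t)).any (fun c => c.2 == "success")
        if (tools.any fun t => failed t && ok t) && !(tools.any fun t => failed t && !ok t) then
          "success_with_fallback"
        else if spans.any (fun sp => pvStatusOf sp == "timeout") then "timeout"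
        else if spans.any (fun sp => pvStatusOf sp == "error") then "tool_failure"
        else "success") := by
  simp only [tagAFinish, flags_fold, Bool.false_or]
  rw [dict_any _ (fun sts => sts.any (fun s => s == "error" || s == "timeout")
        && sts.any (fun s => s == "success")),
      dict_any _ (fun sts => sts.any (fun s => s == "error" || s == "timeout")
        && !sts.any (fun s => s == "success"))]
  simp only [List.any_map]
  rfl

-- ===== VERDICT (by name: the statement is the Claim_ definition above) =====
theorem tag_from_spans_spec : Claim_equal_tag_from_spans := by
  intro spans _
  unfold Spec_tag_from_spans tag_from_spans tag_from_spans_alt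
  rw [tagALoop_eq]
  cases hfp : firstPrevTag spans with
  | some t => rfl
  | none =>
    simp only [Bool.false_or]
    exact finish_eq spans
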